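-- pv_equiv track=rewrite | github.com/KirillZentsov/fuel-mate | shared/csv_parser.py | _build_amenities_json
-- ===== SOURCE A (Python) =====
-- def _build_amenities_json(amenities_list: list) -> dict:
--     """
--     Convert the /pfs `amenities` array into our flat boolean dict.
--
--     The API returns a list of present amenity names. Anything not in the
--     list is False. We hard-code the 8-amenity domain so dict keys are stable.
--
--     Mapping: API's `air_pump_or_screenwash` → our `air_pump`. Renamed at
--     this boundary so the rest of the system isn't tied to the API's naming.
--     """
--     present = {(name or "").strip().lower() for name in amenities_list}
--
--     return {
--         "customer_toilets":      "customer_toilets" in present,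
--         "car_wash":              "car_wash" in present,
--         "air_pump":              "air_pump_or_screenwash" in present,
--         "water_filling":         "water_filling" in present,
--         "twenty_four_hour_fuel": "twenty_four_hour_fuel" in present,
--         "adblue_pumps":          "adblue_pumps" in present,
--         "adblue_packaged":       "adblue_packaged" in present,
--         "lpg_pumps":             "lpg_pumps" in present,
--     }
-- ===== SOURCE B (Python) =====
-- # For each output key, scan the input list directly for its API name (no set, no flag dict).
-- _KEY_TO_API = [
--     ("customer_toilets",      "customer_toilets"),
--     ("car_wash",              "car_wash"),
--     ("air_pump",              "air_pump_or_screenwash"),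
--     ("water_filling",         "water_filling"),
--     ("twenty_four_hour_fuel", "twenty_four_hour_fuel"),
--     ("adblue_pumps",          "adblue_pumps"),
--     ("adblue_packaged",       "adblue_packaged"),
--     ("lpg_pumps",             "lpg_pumps"),
-- ]
--
--
-- def _build_amenities_json(amenities_list: list) -> dict:
--     return {
--         key: any((name or "").strip().lower() == api for name in amenities_list)
--         for key, api in _KEY_TO_API
--     }
-- ===== Notes on version B (the rewrite author's own statement) =====
-- stated objective: simpler
-- what changed: A materializes a set of normalized names and then runs 8 explicit hard-coded membership tests; B builds no intermediate collection at all: a (key, api_name) table drives a dict comprehension whose value for each key is a direct any() scan of the input list comparing normalized entries against that key's API name.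
import Mathlib
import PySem

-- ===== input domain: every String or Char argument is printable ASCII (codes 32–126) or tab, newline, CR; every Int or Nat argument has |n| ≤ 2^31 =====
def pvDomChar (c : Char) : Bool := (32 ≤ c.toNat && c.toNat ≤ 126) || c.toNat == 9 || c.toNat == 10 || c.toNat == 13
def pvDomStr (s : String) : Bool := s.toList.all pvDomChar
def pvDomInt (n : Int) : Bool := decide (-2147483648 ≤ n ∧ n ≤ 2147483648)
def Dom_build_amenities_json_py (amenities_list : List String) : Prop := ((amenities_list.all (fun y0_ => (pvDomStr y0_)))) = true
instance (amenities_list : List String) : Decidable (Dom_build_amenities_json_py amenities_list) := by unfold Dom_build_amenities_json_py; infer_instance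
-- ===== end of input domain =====

-- B drops A's intermediate set entirely: a (key, api_name) table drives a comprehension
-- whose value for each key is a direct any() scan of the input list (objective: simpler).

-- ===== PORT A =====
-- `(name or "").strip().lower()`, the normalisation both Pythons apply
def pvNorm (name : String) : String :=
  PySem.Str.lower (PySem.Str.strip (if name = "" then "" else name))

def build_amenities_json_py (amenities_list : List String) : List (String × Bool) :=
  let present : PySem.Set String := PySem.Set.ofList (amenities_list.map pvNorm)
  [("customer_toilets",      PySem.Set.contains present "customer_toilets"),
   ("car_wash",              PySem.Set.contains present "car_wash"),
   ("air_pump",              PySem.Set.contains present "air_pump_or_screenwash"),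
   ("water_filling",         PySem.Set.contains present "water_filling"),
   ("twenty_four_hour_fuel", PySem.Set.contains present "twenty_four_hour_fuel"),
   ("adblue_pumps",          PySem.Set.contains present "adblue_pumps"),
   ("adblue_packaged",       PySem.Set.contains present "adblue_packaged"),
   ("lpg_pumps",             PySem.Set.contains present "lpg_pumps")]

-- ===== PORT B =====
-- the module-level table _KEY_TO_API
def pvKeyToApi : List (String × String) :=
  [("customer_toilets",      "customer_toilets"),
   ("car_wash",              "car_wash"),
   ("air_pump",              "air_pump_or_screenwash"),
   ("water_filling",         "water_filling"),
   ("twenty_four_hour_fuel", "twenty_four_hour_fuel"),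
   ("adblue_pumps",          "adblue_pumps"),
   ("adblue_packaged",       "adblue_packaged"),
   ("lpg_pumps",             "lpg_pumps")]

def build_amenities_json_py_alt (amenities_list : List String) : List (String × Bool) :=
  pvKeyToApi.map (fun p =>
    (p.1, amenities_list.any (fun name => pvNorm name == p.2)))

-- ===== PRECONDITION & SPEC =====
def Spec_build_amenities_json_py (amenities_list : List String) (out : List (String × Bool)) : Prop := out = build_amenities_json_py_alt amenities_list
instance (amenities_list : List String) (out : List (String × Bool)) : Decidable (Spec_build_amenities_json_py amenities_list out) := by unfold Spec_build_amenities_json_py; infer_instance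

-- ===== CLAIM (what is proved, stated in full; the proofs are below) =====
def Claim_equal_build_amenities_json_py : Prop := ∀ (amenities_list : List String), Dom_build_amenities_json_py amenities_list → Spec_build_amenities_json_py amenities_list (build_amenities_json_py amenities_list)

-- ===== LEMMAS AND PROOFS =====

-- A's set-membership test equals B's direct any() scan of the input list
theorem pv_contains_eq_any (l : List String) (a : String) :
    PySem.Set.contains (PySem.Set.ofList (l.map pvNorm)) a
      = l.any (fun n => pvNorm n == a) := by
  have hc : PySem.Set.contains (PySem.Set.ofList (l.map pvNorm)) a
      = decide (a ∈ PySem.Set.ofList (l.map pvNorm)) := by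
    simp [PySem.Set.contains]
  rw [hc, Bool.eq_iff_iff]
  simp only [decide_eq_true_eq, PySem.Set.mem_ofList, List.mem_map, List.any_eq_true,
    beq_iff_eq]

-- ===== VERDICT (by name: the statement is the Claim_ definition above) =====
theorem build_amenities_json_py_spec : Claim_equal_build_amenities_json_py := by
  intro l _
  show build_amenities_json_py l = build_amenities_json_py_alt l
  simp only [build_amenities_json_py, build_amenities_json_py_alt, pvKeyToApi,
    List.map_cons, List.map_nil, pv_contains_eq_any]
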